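-- pv_equiv track=rewrite | github.com/jk-ashutosh-kumar/underwriting-agent-hackathon | ai-credit-system/ingestion/parser/credcheck_report_parser.py | _merge_delay_records
-- ===== SOURCE A (Python) =====
-- def _merge_delay_records(
--     base: list[dict], incoming: list[dict]
-- ) -> list[dict]:
--     """Merge two lists of delay records, deduplicating on the ``month`` key.
--
--     Within the same month, fields are merged with first-non-null wins so that
--     a partial record from one page is combined with a partial record from
--     another rather than one silently dropping the other.
--
--     Records that lack a ``month`` key cannot be deduplicated; they are
--     appended as-is (rare, but guards against malformed LLM output).
--     """
--     by_month: dict[str, dict] = {}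
--     unkeyed: list[dict] = []
--
--     for record in base + incoming:
--         if not isinstance(record, dict):
--             continue
--         month = record.get("month")
--         if month is None:
--             unkeyed.append(record)
--         elif month not in by_month:
--             by_month[month] = dict(record)
--         else:
--             # Same month seen again — merge field-by-field, first-non-null wins
--             existing = by_month[month]
--             for field, val in record.items():
--                 if existing.get(field) is None and val is not None:
--                     existing[field] = val
--
--     return list(by_month.values()) + unkeyed
-- ===== SOURCE B (Python) =====
-- def _merge_delay_records(
--     base: list[dict], incoming: list[dict]
-- ) -> list[dict]:
--     """Staged variant: split/dedup months first, then collapse each month by filtering.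
--
--     Instead of merging into an accumulator dict while scanning, do it in
--     stages: split records into keyed/unkeyed, list the months in first-seen
--     order, then for each month filter out its records and collapse them
--     left-to-right with first-non-null wins.
--     """
--     records = [r for r in base + incoming if isinstance(r, dict)]
--     keyed = [r for r in records if r.get("month") is not None]
--     unkeyed = [r for r in records if r.get("month") is None]
--
--     months: list = []
--     for r in keyed:
--         m = r.get("month")
--         if m not in months:
--             months.append(m)
--
--     merged_records = []
--     for m in months:
--         group = [r for r in keyed if r.get("month") == m]
--         acc = dict(group[0])
--         for r in group[1:]:
--             for field, val in r.items():
--                 if acc.get(field) is None and val is not None: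
--                     acc[field] = val
--         merged_records.append(acc)
--
--     return merged_records + unkeyed
-- ===== Notes on version B (the rewrite author's own statement) =====
-- stated objective: alternative
-- what changed: A merges records into a by-month accumulator dict during a single scan; B works in stages without that accumulator: it splits records into keyed/unkeyed, builds the first-seen month list, and for each month filters its records out of the keyed list and collapses the group left-to-right.
import Mathlib
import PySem

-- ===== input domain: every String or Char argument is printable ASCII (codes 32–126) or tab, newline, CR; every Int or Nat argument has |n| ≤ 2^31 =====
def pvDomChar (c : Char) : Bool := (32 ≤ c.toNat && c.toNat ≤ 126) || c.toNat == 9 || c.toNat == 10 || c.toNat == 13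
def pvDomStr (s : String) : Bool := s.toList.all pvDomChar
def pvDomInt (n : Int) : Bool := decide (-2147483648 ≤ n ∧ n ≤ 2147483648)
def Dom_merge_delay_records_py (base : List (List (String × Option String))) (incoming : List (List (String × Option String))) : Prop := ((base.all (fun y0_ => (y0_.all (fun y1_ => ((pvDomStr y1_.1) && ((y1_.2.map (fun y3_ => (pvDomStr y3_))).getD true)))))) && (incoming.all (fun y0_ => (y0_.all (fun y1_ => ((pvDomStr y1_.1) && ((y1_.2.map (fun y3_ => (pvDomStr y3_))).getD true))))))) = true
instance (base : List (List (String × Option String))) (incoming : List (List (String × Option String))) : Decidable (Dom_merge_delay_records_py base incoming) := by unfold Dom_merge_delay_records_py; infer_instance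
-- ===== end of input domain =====

-- B drops A's merge-as-you-scan accumulator dict and instead works in stages: split the records
-- into keyed/unkeyed, list the months in first-seen order, then collapse each month's records by
-- filtering them out of the keyed list; alternative decomposition of the same cost. A record (a
-- Python dict) in the Lean model is read through PySem.Dict.ofList, which is the dict Python sees.

-- ===== PORT A =====
-- inner loop of A: `for field, val in record.items(): if existing.get(field) is None and val is not None: existing[field] = val`
def pvMergeInto (existing : PySem.Dict String (Option String)) (record : List (String × Option String)) : PySem.Dict String (Option String) :=
  (PySem.Dict.ofList record).items.foldl
    (fun e fv => if (e.getD fv.1 none).isNone && fv.2.isSome then e.insert fv.1 fv.2 else e)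
    existing

-- loop body of A's single pass over base + incoming
def pvAStep (st : PySem.Dict String (PySem.Dict String (Option String)) × List (List (String × Option String)))
    (record : List (String × Option String)) :
    PySem.Dict String (PySem.Dict String (Option String)) × List (List (String × Option String)) :=
  let r := PySem.Dict.ofList record
  match r.getD "month" none with
  | none => (st.1, st.2 ++ [record])
  | some m =>
    if st.1.contains m = false then (st.1.insert m r, st.2)
    else (st.1.modify m PySem.Dict.empty (fun ex => pvMergeInto ex record), st.2)

def merge_delay_records_py (base : List (List (String × Option String))) (incoming : List (List (String × Option String))) : List (List (String × Option String)) :=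
  let st := (base ++ incoming).foldl pvAStep (PySem.Dict.empty, [])
  st.1.values.map (fun d => d.items) ++ st.2

-- ===== PORT B =====
-- record.get("month")
def pvMonthOf (r : List (String × Option String)) : Option String :=
  (PySem.Dict.ofList r).getD "month" none

-- body of the `if m not in months: months.append(m)` loop
def pvSeenMonths (ms : List String) (r : List (String × Option String)) : List String :=
  match pvMonthOf r with
  | some m => if ms.contains m then ms else ms ++ [m]
  | none => ms

-- collapse of one month group: acc = dict(group[0]); then fill acc's null fields from group[1:]
def pvCollapse (group : List (List (String × Option String))) : List (String × Option String) :=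
  match group with
  | [] => []
  | g0 :: rest => (rest.foldl (fun acc r => pvMergeInto acc r) (PySem.Dict.ofList g0)).items

def merge_delay_records_py_alt (base : List (List (String × Option String))) (incoming : List (List (String × Option String))) : List (List (String × Option String)) :=
  let records := base ++ incoming          -- every element of the modelled input is a dict
  let keyed := records.filter (fun r => (pvMonthOf r).isSome)
  let unkeyed := records.filter (fun r => (pvMonthOf r).isNone)
  let months := keyed.foldl pvSeenMonths []
  months.map (fun m => pvCollapse (keyed.filter (fun r => pvMonthOf r == some m))) ++ unkeyed

-- ===== PRECONDITION & SPEC =====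
def Spec_merge_delay_records_py (base : List (List (String × Option String))) (incoming : List (List (String × Option String))) (out : List (List (String × Option String))) : Prop := out = merge_delay_records_py_alt base incoming
instance (base : List (List (String × Option String))) (incoming : List (List (String × Option String))) (out : List (List (String × Option String))) : Decidable (Spec_merge_delay_records_py base incoming out) := by unfold Spec_merge_delay_records_py; infer_instance

-- ===== CLAIM (what is proved, stated in full; the proofs are below) =====
def Claim_equal_merge_delay_records_py : Prop := ∀ (base : List (List (String × Option String))) (incoming : List (List (String × Option String))), Dom_merge_delay_records_py base incoming → Spec_merge_delay_records_py base incoming (merge_delay_records_py base incoming)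

-- ===== LEMMAS AND PROOFS =====

-- the months-in-first-seen-order list, as a function of the whole record list
def pvMonths (rs : List (List (String × Option String))) : List String :=
  rs.foldl pvSeenMonths []

-- the records of month m, and the left fold that collapses them
def pvGroup (rs : List (List (String × Option String))) (m : String) : List (List (String × Option String)) :=
  rs.filter (fun r => pvMonthOf r == some m)

def pvFoldGroup (group : List (List (String × Option String))) : PySem.Dict String (Option String) :=
  match group with
  | [] => PySem.Dict.empty
  | g0 :: rest => rest.foldl (fun acc r => pvMergeInto acc r) (PySem.Dict.ofList g0)

theorem pvFoldGroup_append (grp : List (List (String × Option String))) (r : List (String × Option String))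
    (h : grp ≠ []) : pvFoldGroup (grp ++ [r]) = pvMergeInto (pvFoldGroup grp) r := by
  cases grp with
  | nil => exact absurd rfl h
  | cons g0 rest => simp [pvFoldGroup, List.foldl_append]

theorem pvCollapse_eq (group : List (List (String × Option String))) (h : group ≠ []) :
    pvCollapse group = (pvFoldGroup group).items := by
  cases group with
  | nil => exact absurd rfl h
  | cons g0 rest => rfl

-- folding pvSeenMonths over the keyed sublist is folding it over all records
theorem pvMonths_filter_keyed (rs : List (List (String × Option String))) (ms : List String) :
    (rs.filter (fun r => (pvMonthOf r).isSome)).foldl pvSeenMonths ms = rs.foldl pvSeenMonths ms := by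
  induction rs generalizing ms with
  | nil => rfl
  | cons r rs ih =>
    cases hm : pvMonthOf r with
    | none => simp [pvSeenMonths, hm, ih]
    | some m => simp [pvSeenMonths, hm, ih]

-- membership in the month fold
theorem pvAStep_eq (st : PySem.Dict String (PySem.Dict String (Option String)) × List (List (String × Option String)))
    (r : List (String × Option String)) :
    pvAStep st r = match pvMonthOf r with
      | none => (st.1, st.2 ++ [r])
      | some m =>
        if st.1.contains m = false then (st.1.insert m (PySem.Dict.ofList r), st.2)
        else (st.1.modify m PySem.Dict.empty (fun ex => pvMergeInto ex r), st.2) := rfl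

theorem pvMonths_mem (rs : List (List (String × Option String))) (ms : List String) (m : String) :
    m ∈ rs.foldl pvSeenMonths ms ↔ m ∈ ms ∨ ∃ r ∈ rs, pvMonthOf r = some m := by
  induction rs generalizing ms with
  | nil => simp
  | cons r rs ih =>
    rw [List.foldl_cons, ih]
    cases hm : pvMonthOf r with
    | none =>
      simp only [pvSeenMonths, hm, List.mem_cons]
      constructor
      · rintro (h | ⟨r', h', hm'⟩)
        · exact Or.inl h
        · exact Or.inr ⟨r', Or.inr h', hm'⟩
      · rintro (h | ⟨r', (rfl | h'), hm'⟩)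
        · exact Or.inl h
        · rw [hm] at hm'; cases hm'
        · exact Or.inr ⟨r', h', hm'⟩
    | some m' =>
      simp only [pvSeenMonths, hm, List.mem_cons]
      by_cases hc : ms.contains m' = true
      · rw [if_pos hc]
        have hmem : m' ∈ ms := by simpa using hc
        constructor
        · rintro (h | ⟨r', h', hm'⟩)
          · exact Or.inl h
          · exact Or.inr ⟨r', Or.inr h', hm'⟩
        · rintro (h | ⟨r', (rfl | h'), hm'⟩)
          · exact Or.inl h
          · rw [hm] at hm'; cases hm'; exact Or.inl hmem
          · exact Or.inr ⟨r', h', hm'⟩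
      · rw [if_neg hc]
        simp only [List.mem_append, List.mem_singleton]
        constructor
        · rintro ((h | h) | ⟨r', h', hm'⟩)
          · exact Or.inl h
          · exact Or.inr ⟨r, Or.inl rfl, by rw [hm, h]⟩
          · exact Or.inr ⟨r', Or.inr h', hm'⟩
        · rintro (h | ⟨r', (rfl | h'), hm'⟩)
          · exact Or.inl (Or.inl h)
          · rw [hm] at hm'; cases hm'; exact Or.inl (Or.inr rfl)
          · exact Or.inr ⟨r', h', hm'⟩

theorem pvMonths_mem_iff (rs : List (List (String × Option String))) (m : String) :
    m ∈ pvMonths rs ↔ ∃ r ∈ rs, pvMonthOf r = some m := by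
  rw [pvMonths, pvMonths_mem]; simp

theorem pvGroup_ne_nil (rs : List (List (String × Option String))) (m : String)
    (h : m ∈ pvMonths rs) : pvGroup rs m ≠ [] := by
  obtain ⟨r, hr, hm⟩ := (pvMonths_mem_iff rs m).mp h
  have : r ∈ pvGroup rs m := List.mem_filter.mpr ⟨hr, by simp [hm]⟩
  intro hnil; rw [hnil] at this; exact absurd this (List.not_mem_nil)

theorem pvGroup_nil_of_not_mem (rs : List (List (String × Option String))) (m : String)
    (h : m ∉ pvMonths rs) : pvGroup rs m = [] := by
  rw [pvGroup, List.filter_eq_nil_iff]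
  intro r hr
  simp only [beq_iff_eq]
  intro hm
  exact h ((pvMonths_mem_iff rs m).mpr ⟨r, hr, hm⟩)

-- characterization of A's loop state after processing rs
theorem pvAState_char (rs : List (List (String × Option String))) :
    (rs.foldl pvAStep (PySem.Dict.empty, [])).1.items
      = (pvMonths rs).map (fun m => (m, pvFoldGroup (pvGroup rs m)))
    ∧ (rs.foldl pvAStep (PySem.Dict.empty, [])).2
      = rs.filter (fun r => (pvMonthOf r).isNone) := by
  induction rs using List.reverseRecOn with
  | nil => simp [pvMonths, PySem.Dict.empty]
  | append_singleton rs r ih =>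
    obtain ⟨h1, h2⟩ := ih
    rw [List.foldl_append, List.foldl_cons, List.foldl_nil]
    have hmonths : pvMonths (rs ++ [r]) = pvSeenMonths (pvMonths rs) r := by
      simp [pvMonths, List.foldl_append]
    cases hm : pvMonthOf r with
    | none =>
      have hgrp : ∀ m, pvGroup (rs ++ [r]) m = pvGroup rs m := by
        intro m; simp [pvGroup, List.filter_append, hm]
      constructor
      · rw [pvAStep_eq, hm]
        dsimp only
        rw [h1, hmonths]
        simp only [pvSeenMonths, hm]
        exact List.map_congr_left (fun m _ => by rw [hgrp m])
      · rw [pvAStep_eq, hm]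
        dsimp only
        rw [h2]
        simp [List.filter_append, hm]
    | some m =>
      have hcont : (rs.foldl pvAStep (PySem.Dict.empty, [])).1.contains m
          = decide (m ∈ pvMonths rs) := by
        simp only [PySem.Dict.contains, h1, List.any_map]
        rcases Classical.em (m ∈ pvMonths rs) with h | h
        · simp only [decide_eq_true h, List.any_eq_true]
          exact ⟨m, h, by simp⟩
        · simp only [decide_eq_false h, List.any_eq_false]
          intro m' hm'
          simp only [Function.comp]
          intro hEq
          exact absurd ((by simpa using hEq : m' = m) ▸ hm') h
      have hunk : (pvAStep (rs.foldl pvAStep (PySem.Dict.empty, [])) r).2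
          = (rs ++ [r]).filter (fun r => (pvMonthOf r).isNone) := by
        rw [pvAStep_eq, hm]
        by_cases hc : (rs.foldl pvAStep (PySem.Dict.empty, [])).1.contains m = false <;>
          simp [hc, h2, List.filter_append, hm]
      by_cases hmem : m ∈ pvMonths rs
      · -- month already seen: A merges into the existing entry
        have hgrp_ne : pvGroup rs m ≠ [] := pvGroup_ne_nil rs m hmem
        have hc : (rs.foldl pvAStep (PySem.Dict.empty, [])).1.contains m = true := by
          rw [hcont]; simp [hmem]
        refine ⟨?_, hunk⟩
        rw [pvAStep_eq, hm]
        simp only [hc, Bool.true_eq_false, if_false]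
        have hfind : (rs.foldl pvAStep (PySem.Dict.empty, [])).1.items.find?
            (fun p => p.1 == m) = some (m, pvFoldGroup (pvGroup rs m)) := by
          rw [h1, List.find?_map]
          have h0 : (pvMonths rs).find? ((fun p => p.1 == m) ∘ (fun m' => (m', pvFoldGroup (pvGroup rs m')))) = some m := by
            have hsome : ((pvMonths rs).find? (fun m' => m' == m)).isSome = true :=
              List.find?_isSome.mpr ⟨m, hmem, by simp⟩
            obtain ⟨x, hx⟩ := Option.isSome_iff_exists.mp hsome
            have hxm : x = m := by simpa using List.find?_some hx
            subst hxm
            simpa [Function.comp] using hx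
          rw [h0]
          rfl
        have hgA : (rs.foldl pvAStep (PySem.Dict.empty, [])).1.getD m PySem.Dict.empty
            = pvFoldGroup (pvGroup rs m) := by
          simp [PySem.Dict.getD, PySem.Dict.get?, hfind]
        simp only [PySem.Dict.modify, hgA]
        rw [PySem.Dict.items_insert_of_contains _ _ hc]
        rw [h1, hmonths, List.map_map]
        simp only [pvSeenMonths, hm]
        rw [if_pos (by simpa using hmem)]
        apply List.map_congr_left
        intro m' _
        simp only [Function.comp]
        by_cases hmm : m' = m
        · subst hmm
          rw [if_pos (by simp)]
          rw [show pvGroup (rs ++ [r]) m' = pvGroup rs m' ++ [r] by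
            simp [pvGroup, List.filter_append, hm]]
          rw [pvFoldGroup_append _ _ hgrp_ne]
        · rw [if_neg (by simp [hmm])]
          rw [show pvGroup (rs ++ [r]) m' = pvGroup rs m' by
            simp [pvGroup, List.filter_append, hm, Ne.symm hmm]]
      · -- new month: A inserts a copy of the record
        have hc : (rs.foldl pvAStep (PySem.Dict.empty, [])).1.contains m = false := by
          rw [hcont]; simp [hmem]
        refine ⟨?_, hunk⟩
        rw [pvAStep_eq, hm]
        simp only [hc]
        rw [if_pos trivial]
        rw [PySem.Dict.items_insert_of_not_contains _ _ hc]
        rw [h1, hmonths]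
        simp only [pvSeenMonths, hm]
        rw [if_neg (by simpa using hmem)]
        rw [List.map_append]
        congr 1
        · apply List.map_congr_left
          intro m' hm'
          have hne : m' ≠ m := fun h => hmem (h ▸ hm')
          rw [show pvGroup (rs ++ [r]) m' = pvGroup rs m' by
            simp [pvGroup, List.filter_append, hm, Ne.symm hne]]
        · simp only [List.map_cons, List.map_nil]
          rw [show pvGroup (rs ++ [r]) m = pvGroup rs m ++ [r] by
            simp [pvGroup, List.filter_append, hm]]
          rw [pvGroup_nil_of_not_mem rs m hmem]
          simp [pvFoldGroup]

-- B's group filter over the keyed list equals the filter over all records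
theorem pvGroup_keyed (rs : List (List (String × Option String))) (m : String) :
    (rs.filter (fun r => (pvMonthOf r).isSome)).filter (fun r => pvMonthOf r == some m)
      = pvGroup rs m := by
  rw [List.filter_filter, pvGroup]
  apply List.filter_congr
  intro r _
  cases pvMonthOf r <;> simp

-- ===== VERDICT (by name: the statement is the Claim_ definition above) =====
theorem merge_delay_records_py_spec : Claim_equal_merge_delay_records_py := by
  intro base incoming _
  unfold Spec_merge_delay_records_py merge_delay_records_py merge_delay_records_py_alt
  obtain ⟨h1, h2⟩ := pvAState_char (base ++ incoming)
  simp only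
  rw [h2, PySem.Dict.values, h1, List.map_map]
  congr 1
  · rw [List.map_map, pvMonths_filter_keyed]
    show _ = (pvMonths (base ++ incoming)).map _
    apply List.map_congr_left
    intro m hm
    simp only [Function.comp]
    rw [pvGroup_keyed, pvCollapse_eq _ (pvGroup_ne_nil _ m hm)]
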